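-- pv_equiv track=rewrite | github.com/erikjin123/uppgift-1 | klasser_test.py | small_straight
-- ===== SOURCE A (Python) =====
-- def small_straight(dice):
-- 	sort = []
-- 	[sort.append(number) for number in dice if number not in sort]
-- 	sort.sort()
-- 	range_list = list(range(min(sort), max(sort) + 1))
-- 	if sort == range_list:
-- 		return sum(range_list)
-- 	else:
-- 		return 0
-- ===== SOURCE B (Python) =====
-- def small_straight(dice):
--     s = set(dice)
--     if max(s) - min(s) + 1 == len(s):
--         return sum(s)
--     return 0
-- ===== Notes on version B (the rewrite author's own statement) =====
-- stated objective: faster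
-- what changed: Instead of building a dedup list with a quadratic membership scan, sorting it and materialising and comparing the full range list, B puts the dice in a set once and checks the straight property arithmetically (max - min + 1 == number of distinct values), summing the set directly.
import Mathlib
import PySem

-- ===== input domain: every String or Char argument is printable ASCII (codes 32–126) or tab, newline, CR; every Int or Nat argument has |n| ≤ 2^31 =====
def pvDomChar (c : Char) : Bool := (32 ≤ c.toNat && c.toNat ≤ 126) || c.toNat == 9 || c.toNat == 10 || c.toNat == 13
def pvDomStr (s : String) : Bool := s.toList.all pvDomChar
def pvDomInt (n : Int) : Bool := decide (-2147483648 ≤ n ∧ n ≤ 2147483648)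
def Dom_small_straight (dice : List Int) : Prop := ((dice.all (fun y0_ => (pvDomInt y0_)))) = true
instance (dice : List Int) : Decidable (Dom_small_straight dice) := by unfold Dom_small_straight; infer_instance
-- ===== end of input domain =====

-- B replaces A's quadratic dedup + sort + range-list comparison by a set and the
-- arithmetic straight test max - min + 1 == number of distinct values.

-- ===== PORT A =====
def small_straight (dice : List Int) : Int :=
  -- sort = []; [sort.append(number) for number in dice if number not in sort]
  let sort := PySem.List.dedup dice
  -- sort.sort()
  let sort := PySem.List.sorted sort (fun x => x) false
  -- min(sort)/max(sort) raise ValueError on the empty list; excluded by Pre_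
  match PySem.List.min? sort (fun x => x), PySem.List.max? sort (fun x => x) with
  | some mn, some mx =>
      let range_list := PySem.List.pyRange mn (mx + 1) 1
      if sort = range_list then range_list.sum else 0
  | _, _ => 0

-- ===== PORT B =====
def small_straight_alt (dice : List Int) : Int :=
  let s := PySem.Set.ofList dice
  -- max(s)/min(s) raise ValueError on the empty set; excluded by Pre_
  match PySem.List.max? s (fun x => x) with
  | none => 0
  | some mx =>
      match PySem.List.min? s (fun x => x) with
      | none => 0
      | some mn =>
          if mx - mn + 1 = (s.length : Int) then s.sum else 0

-- ===== PRECONDITION & SPEC =====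
-- Pre_ excludes only the empty list, on which A raises ValueError (min of empty sequence).
def Pre_small_straight (dice : List Int) : Prop := dice ≠ []
instance (dice : List Int) : Decidable (Pre_small_straight dice) := by unfold Pre_small_straight; infer_instance
def pvWitness_small_straight : List Int := [3, 1, 2, 2]

def Spec_small_straight (dice : List Int) (out : Int) : Prop := out = small_straight_alt dice
instance (dice : List Int) (out : Int) : Decidable (Spec_small_straight dice out) := by unfold Spec_small_straight; infer_instance

-- ===== CLAIM (what is proved, stated in full; the proofs are below) =====
def Claim_equal_small_straight : Prop := ∀ (dice : List Int), Dom_small_straight dice → Pre_small_straight dice → Spec_small_straight dice (small_straight dice)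

-- ===== LEMMAS AND PROOFS =====

lemma min?_id_eq_of_perm (xs ys : List Int) (h : xs.Perm ys) :
    PySem.List.min? xs (fun x => x) = PySem.List.min? ys (fun x => x) := by
  cases hx : PySem.List.min? xs (fun x => x) with
  | none =>
      rw [PySem.List.min?_eq_none_iff] at hx
      subst hx
      rw [eq_comm, PySem.List.min?_eq_none_iff]
      exact h.symm.eq_nil
  | some m =>
      cases hy : PySem.List.min? ys (fun x => x) with
      | none =>
          rw [PySem.List.min?_eq_none_iff] at hy
          subst hy
          have := PySem.List.min?_mem hx
          simp [h.eq_nil] at this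
      | some m' =>
          have hm := PySem.List.min?_mem hx
          have hm' := PySem.List.min?_mem hy
          have h1 := PySem.List.min?_isMin hx m' (h.symm.mem_iff.mp hm')
          have h2 := PySem.List.min?_isMin hy m (h.mem_iff.mp hm)
          simp only [Option.some.injEq]
          exact le_antisymm h1 h2

lemma max?_id_eq_of_perm (xs ys : List Int) (h : xs.Perm ys) :
    PySem.List.max? xs (fun x => x) = PySem.List.max? ys (fun x => x) := by
  cases hx : PySem.List.max? xs (fun x => x) with
  | none =>
      rw [PySem.List.max?_eq_none_iff] at hx
      subst hx
      rw [eq_comm, PySem.List.max?_eq_none_iff]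
      exact h.symm.eq_nil
  | some m =>
      cases hy : PySem.List.max? ys (fun x => x) with
      | none =>
          rw [PySem.List.max?_eq_none_iff] at hy
          subst hy
          have := PySem.List.max?_mem hx
          simp [h.eq_nil] at this
      | some m' =>
          have hm := PySem.List.max?_mem hx
          have hm' := PySem.List.max?_mem hy
          have h1 := PySem.List.max?_isMax hx m' (h.symm.mem_iff.mp hm')
          have h2 := PySem.List.max?_isMax hy m (h.mem_iff.mp hm)
          simp only [Option.some.injEq]
          exact le_antisymm h2 h1

lemma pw_lt_head_bound (l : List Int) (b h : Int)
    (hpw : l.Pairwise (· < ·)) (hb : ∀ x ∈ l, x ≤ b) (hh : l.head? = some h) :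
    h + ((l.length : Int) - 1) ≤ b := by
  induction l generalizing h with
  | nil => simp at hh
  | cons x t ih =>
      simp only [List.head?_cons, Option.some.injEq] at hh
      cases t with
      | nil =>
          have := hb x (by simp)
          simp; omega
      | cons y t' =>
          have hpw' := hpw.tail
          have hxy : x < y := (List.pairwise_cons.mp hpw).1 y (by simp)
          have := ih y hpw' (fun z hz => hb z (List.mem_cons_of_mem _ hz)) rfl
          simp only [List.length_cons] at this ⊢
          push_cast at this ⊢
          omega

lemma eq_pyRange_of_pairwise_lt (l : List Int) (a b : Int)
    (hpw : l.Pairwise (· < ·)) (hmem : ∀ x ∈ l, a ≤ x ∧ x ≤ b)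
    (hlen : (l.length : Int) = b + 1 - a) :
    l = PySem.List.pyRange a (b + 1) 1 := by
  induction l generalizing a with
  | nil =>
      simp only [List.length_nil, Nat.cast_zero] at hlen
      rw [PySem.List.pyRange_one_eq_nil (by omega)]
  | cons x t ih =>
      have hx := hmem x (by simp)
      have hbound := pw_lt_head_bound (x :: t) b x hpw (fun z hz => (hmem z hz).2) rfl
      simp only [List.length_cons] at hlen hbound
      push_cast at hlen hbound
      have hxa : x = a := by omega
      have hab : a < b + 1 := by omega
      rw [PySem.List.pyRange_one_cons hab, hxa]
      congr 1
      have := ih (a + 1) hpw.tail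
        (fun z hz => ⟨by
            have := (List.pairwise_cons.mp hpw).1 z hz; omega,
          (hmem z (List.mem_cons_of_mem _ hz)).2⟩)
        (by omega)
      exact this

-- ===== VERDICT (by name: the statement is the Claim_ definition above) =====
theorem small_straight_spec : Claim_equal_small_straight := by
  intro dice _ hpre
  unfold Spec_small_straight small_straight small_straight_alt
  simp only [PySem.List.dedup_eq_ofList]
  set s := PySem.Set.ofList dice with hs
  set srt := PySem.List.sorted s (fun x => x) false with hsrt
  have hsne : s ≠ [] := by
    cases dice with
    | nil => exact absurd rfl hpre
    | cons d t =>
        have hd : d ∈ s := by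
          rw [hs]; rw [PySem.Set.mem_ofList]; simp
        intro h; rw [h] at hd; simp at hd
  have hperm : srt.Perm s := PySem.List.sorted_perm s (fun x => x) false
  have hpw : srt.Pairwise (· < ·) := PySem.List.sorted_ofList_pairwise_lt dice
  obtain ⟨mn, hmn⟩ : ∃ m, PySem.List.min? s (fun x => x) = some m := by
    cases h : PySem.List.min? s (fun x => x) with
    | none => rw [PySem.List.min?_eq_none_iff] at h; exact absurd h hsne
    | some m => exact ⟨m, rfl⟩
  obtain ⟨mx, hmx⟩ : ∃ m, PySem.List.max? s (fun x => x) = some m := by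
    cases h : PySem.List.max? s (fun x => x) with
    | none => rw [PySem.List.max?_eq_none_iff] at h; exact absurd h hsne
    | some m => exact ⟨m, rfl⟩
  rw [min?_id_eq_of_perm srt s hperm, max?_id_eq_of_perm srt s hperm, hmn, hmx]
  simp only
  have hlow : ∀ x ∈ s, mn ≤ x := PySem.List.min?_isMin hmn
  have hhigh : ∀ x ∈ s, x ≤ mx := PySem.List.max?_isMax hmx
  have hmnmx : mn ≤ mx := hlow mx (PySem.List.max?_mem hmx)
  have hlenp : srt.length = s.length := hperm.length_eq
  have hiff : srt = PySem.List.pyRange mn (mx + 1) 1 ↔ mx - mn + 1 = (s.length : Int) := by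
    constructor
    · intro h
      have hl := congrArg List.length h
      rw [PySem.List.length_pyRange_one, hlenp] at hl
      omega
    · intro h
      exact eq_pyRange_of_pairwise_lt srt mn mx hpw
        (fun x hx => ⟨hlow x (hperm.mem_iff.mp hx), hhigh x (hperm.mem_iff.mp hx)⟩)
        (by rw [hlenp]; omega)
  by_cases hc : srt = PySem.List.pyRange mn (mx + 1) 1
  · rw [if_pos hc, if_pos (hiff.mp hc), ← hc, hperm.sum_eq]
  · rw [if_neg hc, if_neg (fun h => hc (hiff.mpr h))]
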